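-- pv_equiv track=rewrite | github.com/AymeN7852/HitmanPh2 | phaseII.py | grid_to_coords_dict
-- ===== SOURCE A (Python) =====
-- from typing import List, Tuple, Dict , Set, Any
--
-- Grid = List[List[int]]
--
-- def grid_to_coords_dict(grid: Grid) -> dict:
--     """
--     :param grid: grid of the level
--     :return: dict containing position of each element
--     """
--     coords = {
--         "cells": [],
--         "empty": [],
--         "hero": [],
--         "guards": [],
--         "targets": [],
--         "walls": [],
--         "costumes": [],
--         "ropes": [],
--         "nothing": [],
--     }
--
--     for i, line in enumerate(grid):
--         for j, cell in enumerate(line):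
--             if cell != "#":
--                 coords["cells"].append((i, j))
--             if cell in [" ", "G", "T", "W", "C", "R", "N"]:
--                 coords["empty"].append((i, j))
--             if cell == "H":
--                 coords["hero"].append((i, j))
--             elif cell == "G":
--                 coords["guards"].append((i, j))
--             elif cell == "T":
--                 coords["targets"].append((i, j))
--             elif cell == "W":
--                 coords["walls"].append((i, j))
--             elif cell == "C":
--                 coords["costumes"].append((i, j))
--             elif cell == "R":
--                 coords["ropes"].append((i, j))
--             elif cell == "N":
--                 coords["nothing"].append((i, j))
--
--     return coords
-- ===== SOURCE B (Python) =====
-- def grid_to_coords_dict(grid):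
--     """
--     :param grid: grid of the level
--     :return: dict containing position of each element
--     """
--     def pick(pred):
--         return [(i, j) for i, line in enumerate(grid) for j, cell in enumerate(line) if pred(cell)]
--
--     return {
--         "cells": pick(lambda c: c != "#"),
--         "empty": pick(lambda c: c in {" ", "G", "T", "W", "C", "R", "N"}),
--         "hero": pick(lambda c: c == "H"),
--         "guards": pick(lambda c: c == "G"),
--         "targets": pick(lambda c: c == "T"),
--         "walls": pick(lambda c: c == "W"),
--         "costumes": pick(lambda c: c == "C"),
--         "ropes": pick(lambda c: c == "R"),
--         "nothing": pick(lambda c: c == "N"),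
--     }
-- ===== Notes on version B (the rewrite author's own statement) =====
-- stated objective: simpler
-- what changed: Replaced the single multi-accumulator loop maintaining nine lists with one row-major filtering comprehension per output key (nine independent passes), each built directly at its dict entry.
import Mathlib
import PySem

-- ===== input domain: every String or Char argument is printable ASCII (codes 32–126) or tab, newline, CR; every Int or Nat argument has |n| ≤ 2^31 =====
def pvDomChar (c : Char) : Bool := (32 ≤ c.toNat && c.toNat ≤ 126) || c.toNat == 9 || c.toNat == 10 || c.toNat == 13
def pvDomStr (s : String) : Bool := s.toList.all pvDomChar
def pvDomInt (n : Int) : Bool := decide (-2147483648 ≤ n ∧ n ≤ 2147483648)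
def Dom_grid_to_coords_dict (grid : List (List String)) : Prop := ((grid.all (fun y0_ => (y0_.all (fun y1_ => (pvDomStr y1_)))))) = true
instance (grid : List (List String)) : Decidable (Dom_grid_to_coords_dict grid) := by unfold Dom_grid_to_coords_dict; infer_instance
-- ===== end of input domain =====

-- B replaces A's single nine-accumulator loop by one independent filtering pass per key (simpler decomposition; same result).

-- ===== PORT A =====
-- state of A's loop: the nine lists of the dict, in key order
structure PvCoords where
  cells    : List (Int × Int)
  empty    : List (Int × Int)
  hero     : List (Int × Int)
  guards   : List (Int × Int)
  targets  : List (Int × Int)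
  walls    : List (Int × Int)
  costumes : List (Int × Int)
  ropes    : List (Int × Int)
  nothing  : List (Int × Int)
deriving DecidableEq, Repr

-- the body of A's inner loop, step for step: the three statement groups
-- (the cells-append, the empty-append, the elif chain), applied in order
def pvStep1 (i : Int) (c : PvCoords) (j : Int) (cell : String) : PvCoords :=
  if cell ≠ "#" then { c with cells := c.cells ++ [(i, j)] } else c

def pvStep2 (i : Int) (c : PvCoords) (j : Int) (cell : String) : PvCoords :=
  if cell = " " ∨ cell = "G" ∨ cell = "T" ∨ cell = "W" ∨ cell = "C" ∨ cell = "R" ∨ cell = "N"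
  then { c with empty := c.empty ++ [(i, j)] } else c

def pvStep3 (i : Int) (c : PvCoords) (j : Int) (cell : String) : PvCoords :=
  if cell = "H" then { c with hero := c.hero ++ [(i, j)] }
  else if cell = "G" then { c with guards := c.guards ++ [(i, j)] }
  else if cell = "T" then { c with targets := c.targets ++ [(i, j)] }
  else if cell = "W" then { c with walls := c.walls ++ [(i, j)] }
  else if cell = "C" then { c with costumes := c.costumes ++ [(i, j)] }
  else if cell = "R" then { c with ropes := c.ropes ++ [(i, j)] }
  else if cell = "N" then { c with nothing := c.nothing ++ [(i, j)] }
  else c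

def pvStepA (i : Int) (c : PvCoords) (p : Int × String) : PvCoords :=
  pvStep3 i (pvStep2 i (pvStep1 i c p.1 p.2) p.1 p.2) p.1 p.2

def grid_to_coords_dict (grid : List (List String)) : List (String × List (Int × Int)) :=
  let c0 : PvCoords := ⟨[], [], [], [], [], [], [], [], []⟩
  let c := (PySem.List.enumerate grid).foldl
    (fun acc il => (PySem.List.enumerate il.2).foldl (pvStepA il.1) acc) c0
  [("cells", c.cells), ("empty", c.empty), ("hero", c.hero), ("guards", c.guards),
   ("targets", c.targets), ("walls", c.walls), ("costumes", c.costumes),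
   ("ropes", c.ropes), ("nothing", c.nothing)]

-- ===== PORT B =====
-- one filtering comprehension per key
def pvPick (grid : List (List String)) (pred : String → Bool) : List (Int × Int) :=
  (PySem.List.enumerate grid).flatMap (fun il =>
    ((PySem.List.enumerate il.2).filter (fun jc => pred jc.2)).map (fun jc => (il.1, jc.1)))

def grid_to_coords_dict_alt (grid : List (List String)) : List (String × List (Int × Int)) :=
  [("cells",    pvPick grid (fun c => c ≠ "#")),
   ("empty",    pvPick grid (fun c => c = " " ∨ c = "G" ∨ c = "T" ∨ c = "W" ∨ c = "C" ∨ c = "R" ∨ c = "N")),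
   ("hero",     pvPick grid (fun c => c = "H")),
   ("guards",   pvPick grid (fun c => c = "G")),
   ("targets",  pvPick grid (fun c => c = "T")),
   ("walls",    pvPick grid (fun c => c = "W")),
   ("costumes", pvPick grid (fun c => c = "C")),
   ("ropes",    pvPick grid (fun c => c = "R")),
   ("nothing",  pvPick grid (fun c => c = "N"))]

-- ===== PRECONDITION & SPEC =====
def Spec_grid_to_coords_dict (grid : List (List String)) (out : List (String × List (Int × Int))) : Prop := out = grid_to_coords_dict_alt grid
instance (grid : List (List String)) (out : List (String × List (Int × Int))) : Decidable (Spec_grid_to_coords_dict grid out) := by unfold Spec_grid_to_coords_dict; infer_instance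

-- ===== CLAIM (what is proved, stated in full; the proofs are below) =====
def Claim_equal_grid_to_coords_dict : Prop := ∀ (grid : List (List String)), Dom_grid_to_coords_dict grid → Spec_grid_to_coords_dict grid (grid_to_coords_dict grid)

-- ===== LEMMAS AND PROOFS =====

-- one row-filter pass of B, on an already-enumerated row
def pvPickRow (pred : String → Bool) (i : Int) (l : List (Int × String)) : List (Int × Int) :=
  (l.filter (fun jc => pred jc.2)).map (fun jc => (i, jc.1))

theorem pvPickRow_append (pred : String → Bool) (i : Int) (a b : List (Int × String)) :
    pvPickRow pred i (a ++ b) = pvPickRow pred i a ++ pvPickRow pred i b := by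
  simp [pvPickRow]

-- what one step of A's inner loop does to the nine fields
theorem pvStep1_eq (i : Int) (c : PvCoords) (j : Int) (cell : String) :
    pvStep1 i c j cell =
      ⟨c.cells ++ pvPickRow (fun s => s ≠ "#") i [(j, cell)], c.empty, c.hero, c.guards,
       c.targets, c.walls, c.costumes, c.ropes, c.nothing⟩ := by
  by_cases h : cell = "#" <;> simp [pvStep1, pvPickRow, h]

theorem pvStep2_eq (i : Int) (c : PvCoords) (j : Int) (cell : String) :
    pvStep2 i c j cell =
      ⟨c.cells,
       c.empty ++ pvPickRow (fun s => s = " " ∨ s = "G" ∨ s = "T" ∨ s = "W" ∨ s = "C" ∨ s = "R" ∨ s = "N") i [(j, cell)],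
       c.hero, c.guards, c.targets, c.walls, c.costumes, c.ropes, c.nothing⟩ := by
  by_cases h : cell = " " ∨ cell = "G" ∨ cell = "T" ∨ cell = "W" ∨ cell = "C" ∨ cell = "R" ∨ cell = "N" <;>
    simp [pvStep2, pvPickRow, h]

theorem pvStep3_eq (i : Int) (c : PvCoords) (j : Int) (cell : String) :
    pvStep3 i c j cell =
      ⟨c.cells, c.empty,
       c.hero     ++ pvPickRow (fun s => s = "H") i [(j, cell)],
       c.guards   ++ pvPickRow (fun s => s = "G") i [(j, cell)],
       c.targets  ++ pvPickRow (fun s => s = "T") i [(j, cell)],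
       c.walls    ++ pvPickRow (fun s => s = "W") i [(j, cell)],
       c.costumes ++ pvPickRow (fun s => s = "C") i [(j, cell)],
       c.ropes    ++ pvPickRow (fun s => s = "R") i [(j, cell)],
       c.nothing  ++ pvPickRow (fun s => s = "N") i [(j, cell)]⟩ := by
  unfold pvStep3
  split_ifs <;> simp_all [pvPickRow]

theorem pvStepA_eq (i : Int) (c : PvCoords) (p : Int × String) :
    pvStepA i c p =
      ⟨c.cells    ++ pvPickRow (fun s => s ≠ "#") i [p],
       c.empty    ++ pvPickRow (fun s => s = " " ∨ s = "G" ∨ s = "T" ∨ s = "W" ∨ s = "C" ∨ s = "R" ∨ s = "N") i [p],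
       c.hero     ++ pvPickRow (fun s => s = "H") i [p],
       c.guards   ++ pvPickRow (fun s => s = "G") i [p],
       c.targets  ++ pvPickRow (fun s => s = "T") i [p],
       c.walls    ++ pvPickRow (fun s => s = "W") i [p],
       c.costumes ++ pvPickRow (fun s => s = "C") i [p],
       c.ropes    ++ pvPickRow (fun s => s = "R") i [p],
       c.nothing  ++ pvPickRow (fun s => s = "N") i [p]⟩ := by
  simp [pvStepA, pvStep1_eq, pvStep2_eq, pvStep3_eq]

-- A's inner loop, from any accumulator, appends exactly B's nine row passes
theorem pvInner (i : Int) (l : List (Int × String)) (c : PvCoords) :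
    l.foldl (pvStepA i) c =
      ⟨c.cells    ++ pvPickRow (fun s => s ≠ "#") i l,
       c.empty    ++ pvPickRow (fun s => s = " " ∨ s = "G" ∨ s = "T" ∨ s = "W" ∨ s = "C" ∨ s = "R" ∨ s = "N") i l,
       c.hero     ++ pvPickRow (fun s => s = "H") i l,
       c.guards   ++ pvPickRow (fun s => s = "G") i l,
       c.targets  ++ pvPickRow (fun s => s = "T") i l,
       c.walls    ++ pvPickRow (fun s => s = "W") i l,
       c.costumes ++ pvPickRow (fun s => s = "C") i l,
       c.ropes    ++ pvPickRow (fun s => s = "R") i l,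
       c.nothing  ++ pvPickRow (fun s => s = "N") i l⟩ := by
  induction l generalizing c with
  | nil => simp [pvPickRow]
  | cons p l ih =>
    rw [List.foldl_cons, ih, show p :: l = [p] ++ l from rfl]
    simp only [pvPickRow_append, pvStepA_eq, List.append_assoc]

-- A's outer loop, from any accumulator, appends B's nine whole-grid passes
theorem pvOuter (L : List (Int × List String)) (c : PvCoords) :
    L.foldl (fun acc il => (PySem.List.enumerate il.2).foldl (pvStepA il.1) acc) c =
      ⟨c.cells    ++ L.flatMap (fun il => pvPickRow (fun s => s ≠ "#") il.1 (PySem.List.enumerate il.2)),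
       c.empty    ++ L.flatMap (fun il => pvPickRow (fun s => s = " " ∨ s = "G" ∨ s = "T" ∨ s = "W" ∨ s = "C" ∨ s = "R" ∨ s = "N") il.1 (PySem.List.enumerate il.2)),
       c.hero     ++ L.flatMap (fun il => pvPickRow (fun s => s = "H") il.1 (PySem.List.enumerate il.2)),
       c.guards   ++ L.flatMap (fun il => pvPickRow (fun s => s = "G") il.1 (PySem.List.enumerate il.2)),
       c.targets  ++ L.flatMap (fun il => pvPickRow (fun s => s = "T") il.1 (PySem.List.enumerate il.2)),
       c.walls    ++ L.flatMap (fun il => pvPickRow (fun s => s = "W") il.1 (PySem.List.enumerate il.2)),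
       c.costumes ++ L.flatMap (fun il => pvPickRow (fun s => s = "C") il.1 (PySem.List.enumerate il.2)),
       c.ropes    ++ L.flatMap (fun il => pvPickRow (fun s => s = "R") il.1 (PySem.List.enumerate il.2)),
       c.nothing  ++ L.flatMap (fun il => pvPickRow (fun s => s = "N") il.1 (PySem.List.enumerate il.2))⟩ := by
  induction L generalizing c with
  | nil => simp
  | cons p L ih =>
    rw [List.foldl_cons, pvInner, ih]
    simp [List.append_assoc]

theorem pvPick_eq (grid : List (List String)) (pred : String → Bool) :
    pvPick grid pred =
      (PySem.List.enumerate grid).flatMap (fun il => pvPickRow pred il.1 (PySem.List.enumerate il.2)) := rfl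

-- ===== VERDICT (by name: the statement is the Claim_ definition above) =====
theorem grid_to_coords_dict_spec : Claim_equal_grid_to_coords_dict := by
  intro grid _
  unfold Spec_grid_to_coords_dict grid_to_coords_dict grid_to_coords_dict_alt
  simp only [pvOuter, pvPick_eq, List.nil_append]
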